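-- pv_equiv track=rewrite | github.com/1vanKatkov/test | bots228/numerology/report_generator.py | reduce_number
-- ===== SOURCE A (Python) =====
-- def reduce_number(value: int) -> int:
--     if value in (11, 22, 33):
--         return value
--     while value > 9:
--         value = sum(int(d) for d in str(value))
--         if value in (11, 22, 33):
--             break
--     return value
-- ===== SOURCE B (Python) =====
-- def reduce_number(value: int) -> int:
--     if value in (11, 22, 33):
--         return value
--     if value <= 9:
--         return value
--     return reduce_number(sum(int(d) for d in str(value)))
-- ===== Notes on version B (the rewrite author's own statement) =====
-- stated objective: simpler
-- what changed: Replaces the while-loop with break by the classic recursive definition: master-number and single-digit base cases, otherwise recurse on the digit sum.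
import Mathlib
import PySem

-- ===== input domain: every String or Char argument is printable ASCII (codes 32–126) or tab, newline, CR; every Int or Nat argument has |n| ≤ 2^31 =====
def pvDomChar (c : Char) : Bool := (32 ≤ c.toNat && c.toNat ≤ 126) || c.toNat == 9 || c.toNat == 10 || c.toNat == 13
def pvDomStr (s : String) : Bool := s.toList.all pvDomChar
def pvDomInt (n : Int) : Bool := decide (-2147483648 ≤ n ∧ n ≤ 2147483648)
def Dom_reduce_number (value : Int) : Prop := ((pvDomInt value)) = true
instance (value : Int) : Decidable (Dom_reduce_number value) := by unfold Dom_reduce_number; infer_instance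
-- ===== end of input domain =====

-- B replaces A's while-loop-with-break by the classic recursive definition (base cases, then recurse on the digit sum); same values everywhere.

-- shared helper: `value in (11, 22, 33)`
def pvMaster (v : Int) : Bool := v == 11 || v == 22 || v == 33

-- shared helper: `sum(int(d) for d in str(value))`; int(d) ported with getD 0, exact here
-- because it is only reached with value > 9, so every character of str(value) is a digit.
def pvDigitSum (v : Int) : Int :=
  ((PySem.Int.toChars v).map (fun c => (PySem.Int.ofStr? (String.ofList [c])).getD 0)).sum

-- ===== PORT A =====
-- the while-loop, fueled (fuel only makes the loop total; value.toNat bounds the iterations)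
def pvLoopA : Nat → Int → Int
  | 0, v => v
  | f + 1, v =>
    if v > 9 then
      let v' := pvDigitSum v
      if pvMaster v' then v' else pvLoopA f v'
    else v

def reduce_number (value : Int) : Int :=
  if pvMaster value then value else pvLoopA value.toNat value

-- ===== PORT B =====
-- B's recursion, fueled the same way (fuel only makes the recursion total)
def pvRecB : Nat → Int → Int
  | 0, v => v
  | f + 1, v =>
    if pvMaster v then v
    else if v ≤ 9 then v
    else pvRecB f (pvDigitSum v)

def reduce_number_alt (value : Int) : Int := pvRecB value.toNat value

-- ===== PRECONDITION & SPEC =====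
def Spec_reduce_number (value : Int) (out : Int) : Prop := out = reduce_number_alt value
instance (value : Int) (out : Int) : Decidable (Spec_reduce_number value out) := by unfold Spec_reduce_number; infer_instance

-- ===== CLAIM (what is proved, stated in full; the proofs are below) =====
def Claim_equal_reduce_number : Prop := ∀ (value : Int), Dom_reduce_number value → Spec_reduce_number value (reduce_number value)

-- ===== LEMMAS AND PROOFS =====
theorem pvRecB_master (f : Nat) (v : Int) (h : pvMaster v = true) : pvRecB f v = v := by
  cases f <;> simp [pvRecB, h]

theorem pvLoopA_eq_pvRecB (f : Nat) (v : Int) (h : pvMaster v = false) :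
    pvLoopA f v = pvRecB f v := by
  induction f generalizing v with
  | zero => rfl
  | succ f ih =>
    simp only [pvLoopA, pvRecB, h, Bool.false_eq_true, if_false]
    by_cases h9 : v > 9
    · have h9' : ¬ v ≤ 9 := by omega
      simp only [h9, if_true, h9', if_false]
      by_cases hm : pvMaster (pvDigitSum v) = true
      · simp [hm, pvRecB_master f _ hm]
      · simp only [Bool.not_eq_true] at hm
        simp [hm, ih _ hm]
    · have h9' : v ≤ 9 := by omega
      simp [h9, h9']

-- ===== VERDICT (by name: the statement is the Claim_ definition above) =====
theorem reduce_number_spec : Claim_equal_reduce_number := by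
  intro value _
  unfold Spec_reduce_number reduce_number reduce_number_alt
  by_cases hm : pvMaster value = true
  · simp [hm, pvRecB_master _ _ hm]
  · simp only [Bool.not_eq_true] at hm
    simp [hm, pvLoopA_eq_pvRecB _ _ hm]
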